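-- pv_equiv track=rewrite | github.com/chunge16/chunge-skills | skills/chunge-xhs-images/scripts/init_xhs_project.py | outline_template
-- ===== SOURCE A (Python) =====
-- def outline_template(title: str, pages: int) -> str:
--     lines = [
--         "# Outline",
--         "",
--         f"- Working title: {title}",
--         f"- Target pages: {pages}",
--         "",
--     ]
--     default_labels = page_labels(pages)
--     for index in range(1, pages + 1):
--         label = default_labels[index - 1]
--         lines.append(f"- {index:02d}. {label}:")
--     lines.append("")
--     return "\n".join(lines)
--
-- def page_labels(pages: int) -> list[str]:
--     if pages <= 1:
--         return ["cover"]
--     if pages == 2: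
--         return ["cover", "ending"]
--     if pages == 3:
--         return ["cover", "content-1", "ending"]
--
--     middle_count = pages - 2
--     labels = ["cover"]
--     labels.extend(f"content-{index}" for index in range(1, middle_count + 1))
--     labels.append("ending")
--     return labels
-- ===== SOURCE B (Python) =====
-- def outline_template(title: str, pages: int) -> str:
--     def label(index: int) -> str:
--         if index == 1:
--             return "cover"
--         if index == pages:
--             return "ending"
--         return f"content-{index - 1}"
--
--     body = "".join(
--         f"- {index:02d}. {label(index)}:\n" for index in range(1, pages + 1)
--     )
--     return f"# Outline\n\n- Working title: {title}\n- Target pages: {pages}\n\n{body}"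
-- ===== Notes on version B (the rewrite author's own statement) =====
-- stated objective: simpler
-- what changed: B drops the page_labels helper with its per-size special-case table and the intermediate lines list: a single pass over the page indices computes each label directly (cover / ending / content-i) and the result is one f-string with the joined body.
import Mathlib
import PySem

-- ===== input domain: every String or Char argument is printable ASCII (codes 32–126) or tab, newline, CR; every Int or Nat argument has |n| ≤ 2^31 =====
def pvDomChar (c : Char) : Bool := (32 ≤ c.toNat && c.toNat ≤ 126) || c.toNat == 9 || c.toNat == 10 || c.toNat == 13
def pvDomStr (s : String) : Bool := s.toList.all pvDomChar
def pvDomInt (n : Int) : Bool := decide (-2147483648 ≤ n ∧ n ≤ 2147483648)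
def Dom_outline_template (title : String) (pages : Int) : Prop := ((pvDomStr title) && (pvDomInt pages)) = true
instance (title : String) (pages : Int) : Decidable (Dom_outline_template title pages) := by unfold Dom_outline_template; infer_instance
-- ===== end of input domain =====

-- B fuses label computation into the page loop and emits the string directly (no labels list, no lines list): a simpler decomposition, same cost.

-- f"{i:02d}" for an int i (zero-pad to width 2) — shared by both ports, both Pythons write this format
def pvPad2 (i : Int) : List Char := PySem.Chars.zfill (PySem.Int.toChars i) 2

-- ===== PORT A =====
def page_labels (pages : Int) : List (List Char) :=
  if pages ≤ 1 then ["cover".toList]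
  else if pages = 2 then ["cover".toList, "ending".toList]
  else if pages = 3 then ["cover".toList, "content-1".toList, "ending".toList]
  else
    let middle_count := pages - 2
    "cover".toList ::
      ((PySem.List.pyRange 1 (middle_count + 1)).map
        (fun index => "content-".toList ++ PySem.Int.toChars index))
      ++ ["ending".toList]

def outline_template (title : String) (pages : Int) : String :=
  let lines : List (List Char) :=
    ["# Outline".toList, [],
     "- Working title: ".toList ++ title.toList,
     "- Target pages: ".toList ++ PySem.Int.toChars pages,
     []]
  let default_labels := page_labels pages
  -- the Python indexing default_labels[index-1] is always in range (proved below); pyGetD with default []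
  let lines := (PySem.List.pyRange 1 (pages + 1)).foldl
    (fun acc index =>
      acc ++ ["- ".toList ++ pvPad2 index ++ ". ".toList
              ++ PySem.List.pyGetD default_labels (index - 1) [] ++ ":".toList])
    lines
  let lines := lines ++ [[]]
  String.ofList (PySem.Chars.join "\n".toList lines)

-- ===== PORT B =====
def pvLabelB (pages index : Int) : List Char :=
  if index = 1 then "cover".toList
  else if index = pages then "ending".toList
  else "content-".toList ++ PySem.Int.toChars (index - 1)

def outline_template_alt (title : String) (pages : Int) : String :=
  let body := PySem.Chars.join []
    ((PySem.List.pyRange 1 (pages + 1)).map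
      (fun index => "- ".toList ++ pvPad2 index ++ ". ".toList
                    ++ pvLabelB pages index ++ ":\n".toList))
  String.ofList ("# Outline\n\n- Working title: ".toList ++ title.toList
             ++ "\n- Target pages: ".toList ++ PySem.Int.toChars pages
             ++ "\n\n".toList ++ body)

-- ===== PRECONDITION & SPEC =====
def Spec_outline_template (title : String) (pages : Int) (out : String) : Prop := out = outline_template_alt title pages
instance (title : String) (pages : Int) (out : String) : Decidable (Spec_outline_template title pages out) := by unfold Spec_outline_template; infer_instance

-- ===== CLAIM (what is proved, stated in full; the proofs are below) =====
def Claim_equal_outline_template : Prop := ∀ (title : String) (pages : Int), Dom_outline_template title pages → Spec_outline_template title pages (outline_template title pages)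

-- ===== LEMMAS AND PROOFS =====

-- join "" is flatten
theorem pv_join_nil_flatten (ls : List (List Char)) :
    PySem.Chars.join [] ls = ls.flatten := by
  induction ls with
  | nil => simp [PySem.Chars.join_nil]
  | cons a t ih =>
    cases t with
    | nil => simp [PySem.Chars.join_singleton]
    | cons b r => simpa [PySem.Chars.join_cons_cons] using ih

-- "\n".join(ls + [""]) appends '\n' to each element of ls and concatenates
theorem pv_join_newline (ls : List (List Char)) :
    PySem.Chars.join ['\n'] (ls ++ [[]]) = (ls.map (· ++ ['\n'])).flatten := by
  induction ls with
  | nil => simp [PySem.Chars.join_singleton]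
  | cons a t ih =>
    cases h : t ++ [([] : List Char)] with
    | nil => simp at h
    | cons b r =>
      rw [List.cons_append, h, PySem.Chars.join_cons_cons, ← h, ih]
      simp

-- A's indexed lookup into page_labels agrees with B's direct label formula
theorem pv_label_eq (pages i : Int) (h1 : 1 ≤ i) (h2 : i < pages + 1) :
    PySem.List.pyGetD (page_labels pages) (i - 1) [] = pvLabelB pages i := by
  have hi : i ≤ pages := by omega
  by_cases hp1 : pages ≤ 1
  · have : i = 1 := by omega
    subst this
    simp [page_labels, pvLabelB, hp1]
  · by_cases hp2 : pages = 2
    · subst hp2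
      interval_cases i <;> decide
    · by_cases hp3 : pages = 3
      · subst hp3
        interval_cases i <;> decide
      · -- pages ≥ 4: the list is ("cover" :: content-map) ++ ["ending"]
        rw [page_labels]
        simp only [if_neg hp1, if_neg hp2, if_neg hp3]
        rw [PySem.List.pyGetD_eq_getElem _ _ (by omega)
          (by simp; omega)]
        by_cases hie : i = pages
        · subst hie
          rw [List.getElem_append_right (by simp; omega)]
          simp [pvLabelB]
          omega
        · have hlt : (i - 1).toNat < ("cover".toList ::
              (PySem.List.pyRange 1 (pages - 2 + 1)).map
                (fun index => "content-".toList ++ PySem.Int.toChars index)).length := by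
            simp; omega
          rw [List.getElem_append_left hlt]
          by_cases hi1 : i = 1
          · subst hi1; simp [pvLabelB]
          · rw [List.getElem_cons]
            rw [dif_neg (by omega : ¬ (i - 1).toNat = 0)]
            rw [List.getElem_map, PySem.List.getElem_pyRange_one]
            simp [pvLabelB, hi1, hie]
            congr 1
            omega

-- ===== VERDICT (by name: the statement is the Claim_ definition above) =====
theorem outline_template_spec : Claim_equal_outline_template := by
  intro title pages _
  show outline_template title pages = outline_template_alt title pages
  simp only [outline_template, outline_template_alt]
  rw [PySem.List.foldl_append_singleton_eq_map, pv_join_nil_flatten]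
  rw [show ("\n".toList : List Char) = ['\n'] from rfl]
  rw [pv_join_newline, List.map_append, List.map_map]
  have hmap : (PySem.List.pyRange 1 (pages + 1)).map
      ((fun x => x ++ ['\n']) ∘ (fun index => "- ".toList ++ pvPad2 index ++ ". ".toList
        ++ PySem.List.pyGetD (page_labels pages) (index - 1) [] ++ ":".toList))
      = (PySem.List.pyRange 1 (pages + 1)).map
      (fun index => "- ".toList ++ pvPad2 index ++ ". ".toList
        ++ pvLabelB pages index ++ ":\n".toList) := by
    apply List.map_congr_left
    intro i hi
    rw [PySem.List.mem_pyRange_one] at hi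
    simp [Function.comp, pv_label_eq pages i hi.1 hi.2]
  rw [hmap]
  simp
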